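-- pv_equiv track=rewrite | github.com/dohuyminh/Past-Projects-made-during-past-semesters | Swarm_and_bees.py | locate_busyb
-- ===== SOURCE A (Python) =====
-- def locate_busyb(flowers, xmax, ymax):
--     '''
--     Take the co-ordinates of the flowers and the size of the assessing
--     field to find the most optimal place to place the artificial flower based
--     on distance
--     '''
--     cord = []  # Collect all the available co-ordinates aside the real flowers
--
--     val = []  # Used for calculating the distance between the co-ordinates
--     # and the flowers later
--
--     total_distance = []  # Used for storing the value of the total distance
--     # between the assessing co-ordinates and the flowers
--
--     # Check if there is no flower
--     if len(flowers) == 0: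
--         return None
--
--     # Collect all available locations besides the flowers'
--     for a in range(0, ymax + 1):
--         for b in range(0, xmax + 1):
--             if (b, a) not in flowers:
--                 cord.append((b, a))
--
--     # Check if there is no position left
--     if len(cord) == 0:
--         return None
--
--     # Collect the distance value between positions and flowers
--     for c in range(0, len(cord)):
--         for d in range(0, len(flowers)):
--             distance1 = abs(cord[c][0] - flowers[d][0])
--             distance2 = abs(cord[c][1] - flowers[d][1])
--             distance = distance1 + distance2
--             val.append(distance)
--         total_distance.append(sum(val))
--         val.clear()
--
--     # Return the optimized position based on distance
--     return cord[total_distance.index(max(total_distance))]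
-- ===== SOURCE B (Python) =====
-- def locate_busyb(flowers, xmax, ymax):
--     '''
--     Separable-Manhattan rewrite: precompute per-column and per-row distance
--     sums once, then a single grid scan keeping the first strict maximum.
--     '''
--     if not flowers or xmax < 0 or ymax < 0:
--         return None
--     colsum = [sum(abs(x - fx) for fx, _ in flowers) for x in range(xmax + 1)]
--     rowsum = [sum(abs(y - fy) for _, fy in flowers) for y in range(ymax + 1)]
--     flower_set = set(flowers)
--     best = None  # (cell, total distance), first cell attaining the maximum
--     for y in range(ymax + 1):
--         for x in range(xmax + 1):
--             if (x, y) not in flower_set: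
--                 d = colsum[x] + rowsum[y]
--                 if best is None or d > best[1]:
--                     best = ((x, y), d)
--     return best[0] if best is not None else None
-- ===== Notes on version B (the rewrite author's own statement) =====
-- stated objective: faster
-- what changed: Instead of collecting all empty cells and summing the distance to every flower for each cell, B precomputes the per-column and per-row 1-D distance sums (Manhattan distance is separable), puts the flowers in a set, and finds the first maximizing empty cell in one running-max grid scan.
import Mathlib
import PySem

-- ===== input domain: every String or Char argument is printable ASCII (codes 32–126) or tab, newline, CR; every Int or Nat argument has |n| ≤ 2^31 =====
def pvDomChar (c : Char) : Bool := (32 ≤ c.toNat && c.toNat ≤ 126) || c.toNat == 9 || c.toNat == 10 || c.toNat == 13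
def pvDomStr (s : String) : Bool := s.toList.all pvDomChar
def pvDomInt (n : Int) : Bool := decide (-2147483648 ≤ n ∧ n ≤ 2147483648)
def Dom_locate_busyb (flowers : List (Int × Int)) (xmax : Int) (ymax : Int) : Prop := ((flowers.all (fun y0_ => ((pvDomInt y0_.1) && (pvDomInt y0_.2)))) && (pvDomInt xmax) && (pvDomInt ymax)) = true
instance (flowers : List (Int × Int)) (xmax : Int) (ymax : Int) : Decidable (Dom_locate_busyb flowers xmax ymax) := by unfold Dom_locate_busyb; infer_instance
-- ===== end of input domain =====

-- B replaces A's per-cell scan over all flowers by precomputed per-column/per-row 1-D distance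
-- sums (Manhattan distance is separable) and a single running-max grid scan; objective: faster.

-- ===== PORT A =====
def locate_busyb (flowers : List (Int × Int)) (xmax : Int) (ymax : Int) : Option (Int × Int) :=
  if flowers.length = 0 then none
  else
    let cord : List (Int × Int) :=
      (PySem.List.pyRange 0 (ymax + 1) 1).foldl (fun acc a =>
        (PySem.List.pyRange 0 (xmax + 1) 1).foldl (fun acc2 b =>
          if (b, a) ∈ flowers then acc2 else acc2 ++ [(b, a)]) acc) []
    if cord.length = 0 then none
    else
      let total_distance : List Int :=
        cord.foldl (fun td c =>
          let val : List Int :=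
            flowers.foldl (fun v fl => v ++ [|c.1 - fl.1| + |c.2 - fl.2|]) []
          td ++ [val.sum]) []
      match PySem.List.max? total_distance (fun y => y) with
      | none => none
      | some m =>
        match PySem.List.index? total_distance m with
        | none => none
        | some i => PySem.List.pyGet? cord (i : Int)

-- ===== PORT B =====
def locate_busyb_alt (flowers : List (Int × Int)) (xmax : Int) (ymax : Int) : Option (Int × Int) :=
  if flowers.isEmpty ∨ xmax < 0 ∨ ymax < 0 then none
  else
    let colsum : List Int :=
      (PySem.List.pyRange 0 (xmax + 1) 1).map (fun x => (flowers.map (fun fl => |x - fl.1|)).sum)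
    let rowsum : List Int :=
      (PySem.List.pyRange 0 (ymax + 1) 1).map (fun y => (flowers.map (fun fl => |y - fl.2|)).sum)
    let fset : PySem.Set (Int × Int) := PySem.Set.ofList flowers
    let best : Option ((Int × Int) × Int) :=
      (PySem.List.pyRange 0 (ymax + 1) 1).foldl (fun best y =>
        (PySem.List.pyRange 0 (xmax + 1) 1).foldl (fun best x =>
          if (x, y) ∈ fset then best
          else
            -- colsum[x] / rowsum[y]: x,y are always in range here; pyGetD's default is never used
            let d := PySem.List.pyGetD colsum x 0 + PySem.List.pyGetD rowsum y 0
            match best with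
            | none => some ((x, y), d)
            | some p => if d > p.2 then some ((x, y), d) else best) best) none
    match best with
    | none => none
    | some p => some p.1

-- ===== PRECONDITION & SPEC =====
def Spec_locate_busyb (flowers : List (Int × Int)) (xmax : Int) (ymax : Int) (out : Option (Int × Int)) : Prop := out = locate_busyb_alt flowers xmax ymax
instance (flowers : List (Int × Int)) (xmax : Int) (ymax : Int) (out : Option (Int × Int)) : Decidable (Spec_locate_busyb flowers xmax ymax out) := by unfold Spec_locate_busyb; infer_instance

-- ===== CLAIM (what is proved, stated in full; the proofs are below) =====
def Claim_equal_locate_busyb : Prop := ∀ (flowers : List (Int × Int)) (xmax : Int) (ymax : Int), Dom_locate_busyb flowers xmax ymax → Spec_locate_busyb flowers xmax ymax (locate_busyb flowers xmax ymax)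


-- ===== LEMMAS AND PROOFS =====

-- B's running-max step, with the cell score abstracted as f (the stored snd is f of the stored cell)
def pvStep (f : Int × Int → Int) (s : Option ((Int × Int) × Int)) (c : Int × Int) :
    Option ((Int × Int) × Int) :=
  match s with
  | none => some (c, f c)
  | some p => if f c > p.2 then some (c, f c) else s

-- first element attaining the maximum of f over b :: l (seed b, replaced only on strict improvement)
def pvPick (f : Int × Int → Int) : (Int × Int) → List (Int × Int) → (Int × Int)
  | b, [] => b
  | b, c :: l => if f c > f b then pvPick f c l else pvPick f b l

-- the grid cells both programs consider, row by row, flowers removed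
def pvCord (flowers : List (Int × Int)) (xmax ymax : Int) : List (Int × Int) :=
  (PySem.List.pyRange 0 (ymax + 1) 1).flatMap (fun a =>
    ((PySem.List.pyRange 0 (xmax + 1) 1).filter (fun b => decide ((b, a) ∉ flowers))).map
      (fun b => (b, a)))

-- the total Manhattan distance from cell c to all flowers
def pvF (flowers : List (Int × Int)) (c : Int × Int) : Int :=
  (flowers.map (fun fl => |c.1 - fl.1| + |c.2 - fl.2|)).sum

theorem pvL1 (f : Int × Int → Int) (l : List (Int × Int)) :
    ∀ b, l.foldl (pvStep f) (some (b, f b)) = some (pvPick f b l, f (pvPick f b l)) := by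
  induction l with
  | nil => intro b; rfl
  | cons c l ih =>
    intro b
    by_cases h : f c > f b
    · simp [List.foldl_cons, pvStep, pvPick, h, ih c]
    · simp [List.foldl_cons, pvStep, pvPick, h, ih b]

theorem pvL2 (f : Int × Int → Int) (l : List (Int × Int)) :
    ∀ b, (l.map f).foldl max (f b) = f (pvPick f b l) := by
  induction l with
  | nil => intro b; rfl
  | cons c l ih =>
    intro b
    by_cases h : f c > f b
    · have hm : max (f b) (f c) = f c := by omega
      simp [List.foldl_cons, pvPick, h, hm, ih c]
    · have hm : max (f b) (f c) = f b := by omega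
      simp [List.foldl_cons, pvPick, h, hm, ih b]

theorem pvSeedLe (f : Int × Int → Int) (l : List (Int × Int)) :
    ∀ b, f b ≤ f (pvPick f b l) := by
  induction l with
  | nil => intro b; simp [pvPick]
  | cons c l ih =>
    intro b
    by_cases h : f c > f b
    · have := ih c; simp [pvPick, h]; omega
    · simpa [pvPick, h] using ih b

theorem pvSplit (f : Int × Int → Int) (l : List (Int × Int)) :
    ∀ b, ∃ pre suf, b :: l = pre ++ pvPick f b l :: suf ∧
      ∀ y ∈ pre, f y < f (pvPick f b l) := by
  induction l with
  | nil => intro b; exact ⟨[], [], rfl, by simp⟩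
  | cons c l ih =>
    intro b
    by_cases h : f c > f b
    · obtain ⟨pre, suf, heq, hlt⟩ := ih c
      refine ⟨b :: pre, suf, by simp [pvPick, h, ← heq], ?_⟩
      intro y hy
      rcases List.mem_cons.mp hy with rfl | hy
      · have := pvSeedLe f l c; simp [pvPick, h]; omega
      · simpa [pvPick, h] using hlt y hy
    · obtain ⟨pre, suf, heq, hlt⟩ := ih b
      cases pre with
      | nil =>
        simp only [List.nil_append] at heq
        have hb : pvPick f b l = b := by
          injection heq with h1 _
          exact h1.symm
        exact ⟨[], c :: l, by simp [pvPick, h, hb], by simp⟩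
      | cons p pre =>
        simp only [List.cons_append] at heq
        injection heq with hpb heq'
        subst hpb
        have hblt : f b < f (pvPick f b l) := hlt b (by simp)
        refine ⟨b :: c :: pre, suf, ?_, ?_⟩
        · simp [pvPick, h, ← heq']
        · intro y hy
          rcases List.mem_cons.mp hy with rfl | hy
          · simpa [pvPick, h] using hblt
          rcases List.mem_cons.mp hy with rfl | hy
          · have : f y ≤ f b := by omega
            simp [pvPick, h]; omega
          · simpa [pvPick, h] using hlt y (by simp [hy])

theorem pvCore (f : Int × Int → Int) (c : Int × Int) (l : List (Int × Int)) :
    (match PySem.List.max? ((c :: l).map f) (fun y => y) with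
     | none => none
     | some m =>
       match PySem.List.index? ((c :: l).map f) m with
       | none => none
       | some i => PySem.List.pyGet? (c :: l) (i : Int))
    = ((c :: l).foldl (pvStep f) none).map (·.1) := by
  have hmax : PySem.List.max? ((c :: l).map f) (fun y => y) = some (f (pvPick f c l)) := by
    rw [List.map_cons, PySem.List.max?_id_cons, pvL2]
  obtain ⟨pre, suf, heq, hlt⟩ := pvSplit f l c
  have hnot : f (pvPick f c l) ∉ pre.map f := by
    intro hm
    obtain ⟨y, hy, hfy⟩ := List.mem_map.mp hm
    have := hlt y hy; omega
  have hidx : PySem.List.index? ((c :: l).map f) (f (pvPick f c l)) = some pre.length := by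
    rw [PySem.List.index?_eq_some_iff]
    exact ⟨pre.map f, suf.map f, by rw [heq]; simp, by simp, hnot⟩
  have hfold : (c :: l).foldl (pvStep f) none = some (pvPick f c l, f (pvPick f c l)) := by
    have : (c :: l).foldl (pvStep f) none = l.foldl (pvStep f) (some (c, f c)) := rfl
    rw [this, pvL1]
  rw [hmax, hfold]
  show (match PySem.List.index? ((c :: l).map f) (f (pvPick f c l)) with
        | none => none
        | some i => PySem.List.pyGet? (c :: l) (i : Int))
      = Option.map (fun x => x.1) (some (pvPick f c l, f (pvPick f c l)))
  rw [hidx]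
  show PySem.List.pyGet? (c :: l) ((pre.length : Nat) : Int) = some (pvPick f c l)
  rw [heq]
  simp

-- outer loop over rows of inner folds = one fold over the concatenated cell list
theorem pvFoldlFlatMap {σ : Type} (l : List Int) (g : Int → List (Int × Int))
    (G : σ → (Int × Int) → σ) :
    ∀ init, l.foldl (fun s a => (g a).foldl G s) init = (l.flatMap g).foldl G init := by
  induction l with
  | nil => intro init; rfl
  | cons a l ih =>
    intro init
    simp only [List.foldl_cons, List.flatMap_cons, List.foldl_append]
    exact ih _

-- A's cell-collection double loop builds exactly pvCord
theorem pvA_cord (flowers : List (Int × Int)) (xmax ymax : Int) :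
    (PySem.List.pyRange 0 (ymax + 1) 1).foldl (fun acc a =>
        (PySem.List.pyRange 0 (xmax + 1) 1).foldl (fun acc2 b =>
          if (b, a) ∈ flowers then acc2 else acc2 ++ [(b, a)]) acc) []
      = pvCord flowers xmax ymax := by
  have hstep : (fun (acc : List (Int × Int)) a =>
      (PySem.List.pyRange 0 (xmax + 1) 1).foldl (fun acc2 b =>
        if (b, a) ∈ flowers then acc2 else acc2 ++ [(b, a)]) acc)
      = (fun acc a => acc ++
          ((PySem.List.pyRange 0 (xmax + 1) 1).filter (fun b => decide ((b, a) ∉ flowers))).map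
            (fun b => (b, a))) := by
    funext acc a
    have hflip : (fun (acc2 : List (Int × Int)) b =>
        if (b, a) ∈ flowers then acc2 else acc2 ++ [(b, a)])
        = (fun acc2 b => if (b, a) ∉ flowers then acc2 ++ [(b, a)] else acc2) := by
      funext acc2 b
      by_cases hb : (b, a) ∈ flowers <;> simp [hb]
    rw [hflip, PySem.List.foldl_append_ite]
  rw [hstep]
  have := PySem.List.foldl_append_eq_flatMap
    (l := PySem.List.pyRange 0 (ymax + 1) 1)
    (g := fun a => ((PySem.List.pyRange 0 (xmax + 1) 1).filter
        (fun b => decide ((b, a) ∉ flowers))).map (fun b => (b, a)))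
    (acc := ([] : List (Int × Int)))
  rw [this]
  rfl

-- A's distance-accumulation loop is mapping pvF over the cells
theorem pvA_td (flowers cord : List (Int × Int)) :
    cord.foldl (fun td c =>
        td ++ [(flowers.foldl (fun v fl => v ++ [|c.1 - fl.1| + |c.2 - fl.2|]) []).sum]) []
      = cord.map (pvF flowers) := by
  have hstep : (fun (td : List Int) (c : Int × Int) =>
      td ++ [(flowers.foldl (fun v fl => v ++ [|c.1 - fl.1| + |c.2 - fl.2|]) []).sum])
      = (fun td c => td ++ [pvF flowers c]) := by
    funext td c
    rw [PySem.List.foldl_append_singleton_eq_map]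
    simp [pvF]
  rw [hstep, PySem.List.foldl_append_singleton_eq_map]
  rfl

theorem pvA_eq (flowers : List (Int × Int)) (xmax ymax : Int) (h : flowers ≠ []) :
    locate_busyb flowers xmax ymax =
      match pvCord flowers xmax ymax with
      | [] => none
      | c :: l =>
        (match PySem.List.max? ((c :: l).map (pvF flowers)) (fun y => y) with
         | none => none
         | some m =>
           match PySem.List.index? ((c :: l).map (pvF flowers)) m with
           | none => none
           | some i => PySem.List.pyGet? (c :: l) (i : Int)) := by
  unfold locate_busyb
  rw [if_neg (by simpa using h)]
  rw [pvA_cord]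
  cases hc : pvCord flowers xmax ymax with
  | nil => simp
  | cons c l =>
    rw [if_neg (by simp)]
    rw [pvA_td]

-- B's scan is the pvStep fold over the same cell list
-- the lookup B makes for cell (x, y): colsum[x] + rowsum[y]
def pvD (flowers : List (Int × Int)) (xmax ymax x y : Int) : Int :=
  PySem.List.pyGetD ((PySem.List.pyRange 0 (xmax + 1) 1).map
      (fun x => (flowers.map (fun fl => |x - fl.1|)).sum)) x 0
  + PySem.List.pyGetD ((PySem.List.pyRange 0 (ymax + 1) 1).map
      (fun y => (flowers.map (fun fl => |y - fl.2|)).sum)) y 0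

-- B's running-max step as it literally appears in the port
def pvG (flowers : List (Int × Int)) (xmax ymax : Int) (best : Option ((Int × Int) × Int))
    (c : Int × Int) : Option ((Int × Int) × Int) :=
  match best with
  | none => some (c, pvD flowers xmax ymax c.1 c.2)
  | some p => if pvD flowers xmax ymax c.1 c.2 > p.2 then some (c, pvD flowers xmax ymax c.1 c.2)
              else best

theorem pvCord_mem (flowers : List (Int × Int)) (xmax ymax : Int) (c : Int × Int)
    (hc : c ∈ pvCord flowers xmax ymax) :
    0 ≤ c.1 ∧ c.1 < xmax + 1 ∧ 0 ≤ c.2 ∧ c.2 < ymax + 1 := by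
  unfold pvCord at hc
  simp only [List.mem_flatMap, List.mem_map, List.mem_filter,
    PySem.List.mem_pyRange_one] at hc
  obtain ⟨a, ⟨ha1, ha2⟩, b, ⟨⟨hb1, hb2⟩, _⟩, rfl⟩ := hc
  exact ⟨hb1, hb2, ha1, ha2⟩

theorem pvD_eq (flowers : List (Int × Int)) (xmax ymax x y : Int)
    (hx0 : 0 ≤ x) (hx1 : x < xmax + 1) (hy0 : 0 ≤ y) (hy1 : y < ymax + 1) :
    pvD flowers xmax ymax x y = pvF flowers (x, y) := by
  unfold pvD pvF
  rw [PySem.List.pyGetD_map_pyRange_of_nonneg _ _ _ _ hx0 hx1,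
      PySem.List.pyGetD_map_pyRange_of_nonneg _ _ _ _ hy0 hy1,
      ← PySem.List.sum_map_add_int]

theorem pvB_inner (flowers : List (Int × Int)) (xmax ymax y : Int)
    (best : Option ((Int × Int) × Int)) :
    (PySem.List.pyRange 0 (xmax + 1) 1).foldl (fun best x =>
        if (x, y) ∈ PySem.Set.ofList flowers then best
        else pvG flowers xmax ymax best (x, y)) best
      = (((PySem.List.pyRange 0 (xmax + 1) 1).filter
            (fun x => decide ((x, y) ∉ flowers))).map (fun x => (x, y))).foldl
          (pvG flowers xmax ymax) best := by
  have hflip : (fun (best : Option ((Int × Int) × Int)) x =>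
      if (x, y) ∈ PySem.Set.ofList flowers then best else pvG flowers xmax ymax best (x, y))
      = (fun best x => if (x, y) ∉ flowers then pvG flowers xmax ymax best (x, y) else best) := by
    funext best x
    by_cases hb : (x, y) ∈ flowers <;> simp [hb, PySem.Set.mem_ofList]
  rw [hflip, PySem.List.foldl_ite_eq_foldl_filter, List.foldl_map]

theorem pvB_big (flowers : List (Int × Int)) (xmax ymax : Int) :
    (match
      (PySem.List.pyRange 0 (ymax + 1) 1).foldl (fun best y =>
        (PySem.List.pyRange 0 (xmax + 1) 1).foldl (fun best x =>
          if (x, y) ∈ PySem.Set.ofList flowers then best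
          else pvG flowers xmax ymax best (x, y)) best) none
     with
     | none => none
     | some p => some p.1)
    = ((pvCord flowers xmax ymax).foldl (pvStep (pvF flowers)) none).map (·.1) := by
  have hstep : (fun (best : Option ((Int × Int) × Int)) y =>
      (PySem.List.pyRange 0 (xmax + 1) 1).foldl (fun best x =>
        if (x, y) ∈ PySem.Set.ofList flowers then best
        else pvG flowers xmax ymax best (x, y)) best)
      = (fun best y => (((PySem.List.pyRange 0 (xmax + 1) 1).filter
            (fun x => decide ((x, y) ∉ flowers))).map (fun x => (x, y))).foldl
          (pvG flowers xmax ymax) best) := by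
    funext best y
    exact pvB_inner flowers xmax ymax y best
  rw [hstep, pvFoldlFlatMap]
  have hcord : (PySem.List.pyRange 0 (ymax + 1) 1).flatMap (fun y =>
      ((PySem.List.pyRange 0 (xmax + 1) 1).filter
        (fun x => decide ((x, y) ∉ flowers))).map (fun x => (x, y)))
      = pvCord flowers xmax ymax := rfl
  rw [hcord]
  have hG : (pvCord flowers xmax ymax).foldl (pvG flowers xmax ymax) none
      = (pvCord flowers xmax ymax).foldl (pvStep (pvF flowers)) none := by
    apply PySem.List.foldl_congr_mem
    intro best c hc
    obtain ⟨h1, h2, h3, h4⟩ := pvCord_mem flowers xmax ymax c hc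
    unfold pvG pvStep
    rw [pvD_eq flowers xmax ymax c.1 c.2 h1 h2 h3 h4]
  rw [hG]
  cases (pvCord flowers xmax ymax).foldl (pvStep (pvF flowers)) none <;> rfl

theorem pvCord_nil (flowers : List (Int × Int)) (xmax ymax : Int)
    (h : xmax < 0 ∨ ymax < 0) : pvCord flowers xmax ymax = [] := by
  unfold pvCord
  rcases h with h | h
  · have hx : PySem.List.pyRange 0 (xmax + 1) 1 = [] :=
      PySem.List.pyRange_one_eq_nil (by omega)
    simp [hx]
  · have hy : PySem.List.pyRange 0 (ymax + 1) 1 = [] :=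
      PySem.List.pyRange_one_eq_nil (by omega)
    rw [hy]
    rfl

theorem pvB_eq (flowers : List (Int × Int)) (xmax ymax : Int) (h : flowers ≠ []) :
    locate_busyb_alt flowers xmax ymax =
      ((pvCord flowers xmax ymax).foldl (pvStep (pvF flowers)) none).map (·.1) := by
  unfold locate_busyb_alt
  by_cases hneg : xmax < 0 ∨ ymax < 0
  · rw [if_pos (Or.inr hneg), pvCord_nil flowers xmax ymax hneg]
    rfl
  · rw [if_neg (by simp [List.isEmpty_iff, h]; omega)]
    exact pvB_big flowers xmax ymax

-- ===== VERDICT (by name: the statement is the Claim_ definition above) =====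
theorem locate_busyb_spec : Claim_equal_locate_busyb := by
  intro flowers xmax ymax _hdom
  unfold Spec_locate_busyb
  cases flowers with
  | nil => rfl
  | cons f0 fl =>
    rw [pvA_eq (f0 :: fl) xmax ymax (by simp), pvB_eq (f0 :: fl) xmax ymax (by simp)]
    cases hc : pvCord (f0 :: fl) xmax ymax with
    | nil => rfl
    | cons c l => exact pvCore (pvF (f0 :: fl)) c l
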